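-- pv_equiv track=rewrite | github.com/T12knightally/ONOTE | metrics/evaluate_ast.py | sanitize_ai_output
-- ===== SOURCE A (Python) =====
-- def sanitize_ai_output(raw_text: str) -> str:
--     """Truncates hallucinations and prevents infinite generation loops."""
--     if not raw_text: return ""
--     tokens = raw_text.strip().split()
--
--     # Limit maximum length to prevent memory overflow or malicious evaluation outputs
--     if len(tokens) > 80:
--         tokens = tokens[:60]
--
--     # Truncate infinite repetition loops (e.g., model continuously outputs C4(1/4) C4(1/4)...)
--     for i in range(len(tokens) - 5):
--         if len(set(tokens[i:i+6])) == 1: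
--             return " ".join(tokens[:i+1])
--
--     return " ".join(tokens)
-- ===== SOURCE B (Python) =====
-- def sanitize_ai_output(raw_text: str) -> str:
--     """Truncates hallucinations and prevents infinite generation loops."""
--     if not raw_text:
--         return ""
--     tokens = raw_text.strip().split()
--     if len(tokens) > 80:
--         tokens = tokens[:60]
--     # Running count of consecutive identical tokens; cut at the first run of 6.
--     run = 1
--     for j in range(1, len(tokens)):
--         if tokens[j] == tokens[j - 1]:
--             run += 1
--             if run == 6:
--                 return " ".join(tokens[:j - 4])
--         else:
--             run = 1
--     return " ".join(tokens)
-- ===== Notes on version B (the rewrite author's own statement) =====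
-- stated objective: alternative
-- what changed: Replaces the per-window set construction (a fresh 6-element set for every index) with a single running counter of consecutive identical tokens that cuts the moment the run reaches 6.
import Mathlib
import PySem

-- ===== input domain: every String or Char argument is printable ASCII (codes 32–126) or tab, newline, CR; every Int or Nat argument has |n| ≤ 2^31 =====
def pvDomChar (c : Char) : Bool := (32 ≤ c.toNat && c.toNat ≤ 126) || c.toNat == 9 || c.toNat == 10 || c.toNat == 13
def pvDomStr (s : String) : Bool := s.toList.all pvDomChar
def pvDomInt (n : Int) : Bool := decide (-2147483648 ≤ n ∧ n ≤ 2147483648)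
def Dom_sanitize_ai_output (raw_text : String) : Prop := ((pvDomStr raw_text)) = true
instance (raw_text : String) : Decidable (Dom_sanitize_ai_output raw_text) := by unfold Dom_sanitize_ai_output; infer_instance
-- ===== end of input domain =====

-- B replaces A's per-window 6-element set test with a single running counter of
-- consecutive identical tokens (alternative decomposition; return values proved equal).

-- ===== PORT A =====
-- A's loop condition: len(set(tokens[i:i+6])) == 1
def condA (tokens : List String) (i : Nat) : Bool :=
  PySem.Set.len (PySem.Set.ofList (PySem.List.slice tokens (some (i : Int)) (some ((i : Int) + 6)))) == 1

def sanitize_ai_output (raw_text : String) : String :=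
  if raw_text = "" then ""
  else
    let tokens0 := PySem.Str.split₀ (PySem.Str.strip raw_text)
    let tokens := if tokens0.length > 80 then PySem.List.slice tokens0 none (some 60) else tokens0
    -- for i in range(len(tokens)-5): first i whose 6-window is a singleton set → early return
    match (List.range (tokens.length - 5)).find? (condA tokens) with
    | some i => PySem.Str.join " " (tokens.take (i + 1))
    | none => PySem.Str.join " " tokens

-- ===== PORT B =====
-- B's loop: j from 1, run = count of consecutive identical tokens; returns the cut length j-4 when run hits 6
def bFindRun (tokens : List String) (j : Nat) (run : Nat) : Option Nat :=
  if j < tokens.length then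
    if tokens.getD j "" == tokens.getD (j - 1) "" then
      if run + 1 == 6 then some (j - 4)
      else bFindRun tokens (j + 1) (run + 1)
    else bFindRun tokens (j + 1) 1
  else none
termination_by tokens.length - j

def sanitize_ai_output_alt (raw_text : String) : String :=
  if raw_text = "" then ""
  else
    let tokens0 := PySem.Str.split₀ (PySem.Str.strip raw_text)
    let tokens := if tokens0.length > 80 then PySem.List.slice tokens0 none (some 60) else tokens0
    match bFindRun tokens 1 1 with
    | some k => PySem.Str.join " " (tokens.take k)
    | none => PySem.Str.join " " tokens

-- ===== PRECONDITION & SPEC =====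
def Spec_sanitize_ai_output (raw_text : String) (out : String) : Prop := out = sanitize_ai_output_alt raw_text
instance (raw_text : String) (out : String) : Decidable (Spec_sanitize_ai_output raw_text out) := by unfold Spec_sanitize_ai_output; infer_instance

-- ===== CLAIM (what is proved, stated in full; the proofs are below) =====
def Claim_equal_sanitize_ai_output : Prop := ∀ (raw_text : String), Dom_sanitize_ai_output raw_text → Spec_sanitize_ai_output raw_text (sanitize_ai_output raw_text)

-- ===== LEMMAS AND PROOFS =====

theorem setlen1 (l : List String) (hne : l ≠ []) :
    (PySem.Set.len (PySem.Set.ofList l) == 1) = true ↔ (∀ x ∈ l, x = l.headD "") := by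
  rw [beq_iff_eq]
  have hlen : PySem.Set.len (PySem.Set.ofList l) = (PySem.Set.ofList l).length := rfl
  rw [hlen]
  constructor
  · intro h x hx
    have hx' : x ∈ PySem.Set.ofList l := (PySem.Set.mem_ofList l x).mpr hx
    have hh : l.headD "" ∈ PySem.Set.ofList l := by
      refine (PySem.Set.mem_ofList l _).mpr ?_
      cases l with
      | nil => exact absurd rfl hne
      | cons a t => simp
    rcases hl : PySem.Set.ofList l with _ | ⟨a, t⟩
    · rw [hl] at h; simp at h
    · rw [hl] at h hx' hh
      have ht : t = [] := by
        cases t with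
        | nil => rfl
        | cons b u => simp at h; omega
      subst ht
      simp at hx' hh
      cases l with
      | nil => exact absurd rfl hne
      | cons b u =>
        simp at hh
        rw [hx', List.headD_cons]
        exact hh.symm
  · intro h
    have hnodup := PySem.Set.nodup_ofList l
    rcases hl : PySem.Set.ofList l with _ | ⟨a, t⟩
    · exfalso
      cases l with
      | nil => exact hne rfl
      | cons b u =>
        have : b ∈ PySem.Set.ofList (b :: u) := (PySem.Set.mem_ofList _ _).mpr (by simp)
        rw [hl] at this; simp at this
    · have ht : t = [] := by
        cases t with
        | nil => rfl
        | cons b u =>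
          rw [hl] at hnodup
          have hb : b ∈ l := (PySem.Set.mem_ofList l b).mp (by rw [hl]; simp)
          have ha : a ∈ l := (PySem.Set.mem_ofList l a).mp (by rw [hl]; simp)
          have := (h b hb).trans (h a ha).symm
          subst this
          simp at hnodup
      subst ht; rfl
theorem condA_iff (ts : List String) (i : Nat) (h : i + 6 ≤ ts.length) :
    condA ts i = true ↔ ∀ k, i ≤ k → k ≤ i + 5 → ts.getD k "" = ts.getD i "" := by
  unfold condA
  have hs : PySem.List.slice ts (some (i : Int)) (some ((i : Int) + 6)) = (ts.drop i).take 6 := by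
    have := PySem.List.slice_natCast_add ts i 6
    push_cast at this
    exact this
  rw [hs]
  have hget : ∀ m : Nat, m < 6 → ts.getD (i + m) "" = ((ts.drop i).take 6).getD m "" := by
    intro m hm
    rw [List.getD_eq_getElem ts "" (by omega),
        List.getD_eq_getElem ((ts.drop i).take 6) "" (by simp; omega),
        List.getElem_take, List.getElem_drop]
  have hne : (ts.drop i).take 6 ≠ [] := by
    intro hc
    have := congrArg List.length hc
    simp at this
    omega
  rw [setlen1 _ hne]
  have hhead : ((ts.drop i).take 6).headD "" = ts.getD i "" := by
    have h0 := hget 0 (by omega)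
    rw [Nat.add_zero] at h0
    cases hc : (ts.drop i).take 6 with
    | nil => exact absurd hc hne
    | cons a t =>
      rw [hc] at h0
      simp at h0
      simp [h0]
  constructor
  · intro hall k hik hk5
    have hm : k - i < 6 := by omega
    have hk : k = i + (k - i) := by omega
    rw [hk, hget _ hm, ← hhead]
    apply hall
    rw [List.mem_iff_getElem]
    exact ⟨k - i, by simp; omega, (List.getD_eq_getElem _ "" (by simp; omega)).symm⟩
  · intro hall x hx
    rw [List.mem_iff_getElem] at hx
    rcases hx with ⟨m, hm, hxm⟩
    have hm6 : m < 6 := by simp at hm; omega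
    rw [← hxm, ← List.getD_eq_getElem _ "" hm, ← hget m hm6, hhead]
    exact hall (i + m) (by omega) (by omega)
theorem find?_range_eq_some {p : Nat → Bool} {i0 n : Nat} (hi : i0 < n) (hp : p i0 = true)
    (hlt : ∀ i, i < i0 → p i = false) : (List.range n).find? p = some i0 := by
  have hsplit : List.range n = List.range' 0 i0 ++ List.range' i0 (n - i0) := by
    rw [List.range_eq_range', show n = i0 + (n - i0) from by omega, ← List.range'_append]
    norm_num
  rw [hsplit, List.find?_append]
  have h1 : (List.range' 0 i0).find? p = none := by
    rw [List.find?_eq_none]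
    intro x hx
    have := List.mem_range'_1.mp hx
    simp [hlt x (by omega)]
  rw [h1]
  have h2 : List.range' i0 (n - i0) = i0 :: List.range' (i0 + 1) (n - i0 - 1) := by
    cases hni : n - i0 with
    | zero => omega
    | succ m =>
      rw [List.range'_succ]
      norm_num
  rw [h2]
  simp [hp]
theorem bFindRun_eq (fuel : Nat) : ∀ (ts : List String) (j run : Nat),
    ts.length - j ≤ fuel →
    1 ≤ run → run ≤ 5 → run ≤ j → j ≤ ts.length →
    (∀ k, j - run ≤ k → k < j → ts.getD k "" = ts.getD (j - run) "") →
    (run = j ∨ ts.getD (j - run - 1) "" ≠ ts.getD (j - run) "") →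
    (∀ i, i + 5 < j → condA ts i = false) →
    bFindRun ts j run = ((List.range (ts.length - 5)).find? (condA ts)).map (· + 1) := by
  induction fuel with
  | zero =>
    intro ts j run hf h1 h5 hrj hjl hblk hmax hfail
    have hj : ¬ j < ts.length := by omega
    rw [bFindRun]
    simp only [hj, if_false]
    have hnone : (List.range (ts.length - 5)).find? (condA ts) = none := by
      rw [List.find?_eq_none]
      intro i hi
      have := List.mem_range.mp hi
      simp [hfail i (by omega)]
    rw [hnone]; rfl
  | succ n ih =>
    intro ts j run hf h1 h5 hrj hjl hblk hmax hfail
    by_cases hjlen : j < ts.length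
    · rw [bFindRun]
      simp only [hjlen, if_true]
      by_cases heq : ts.getD j "" = ts.getD (j - 1) ""
      · rw [if_pos (beq_iff_eq.mpr heq)]
        by_cases hr6 : run + 1 = 6
        · rw [if_pos (beq_iff_eq.mpr hr6)]
          have hr5 : run = 5 := by omega
          have hj5 : 5 ≤ j := by omega
          have hwin : condA ts (j - 5) = true := by
            rw [condA_iff ts (j - 5) (by omega)]
            intro k hk1 hk2
            have hjr : j - run = j - 5 := by omega
            by_cases hkj : k < j
            · rw [← hjr]
              exact hblk k (by omega) hkj
            · have hkj' : k = j := by omega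
              rw [hkj', heq, ← hjr]
              exact hblk (j - 1) (by omega) (by omega)
          have hfind : (List.range (ts.length - 5)).find? (condA ts) = some (j - 5) := by
            apply find?_range_eq_some (by omega) hwin
            intro i hi
            exact hfail i (by omega)
          rw [hfind]
          simp only [Option.map_some]
          congr 1
          omega
        · rw [if_neg (fun h => hr6 (beq_iff_eq.mp h))]
          refine ih ts (j + 1) (run + 1) (by omega) (by omega) (by omega) (by omega) (by omega) ?_ ?_ ?_
          · intro k hk1 hk2
            have hidx : j + 1 - (run + 1) = j - run := by omega
            rw [hidx] at hk1 ⊢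
            by_cases hkj : k < j
            · exact hblk k hk1 hkj
            · have hkj' : k = j := by omega
              rw [hkj', heq]
              exact hblk (j - 1) (by omega) (by omega)
          · rcases hmax with hl | hr
            · left; omega
            · right
              have hidx : j + 1 - (run + 1) = j - run := by omega
              rw [hidx]
              exact hr
          · intro i hi
            by_cases hij : i + 5 < j
            · exact hfail i hij
            · have hij' : i + 5 = j := by omega
              have hj5 : 5 ≤ j := by omega
              have hrj' : run < j := by omega
              have hbr : ts.getD (j - run - 1) "" ≠ ts.getD (j - run) "" := by
                rcases hmax with hl | hr
                · omega
                · exact hr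
              rw [← Bool.not_eq_true, condA_iff ts i (by omega)]
              intro hall
              have e1 := hall (j - run - 1) (by omega) (by omega)
              have e2 := hall (j - run) (by omega) (by omega)
              exact hbr (e1.trans e2.symm)
      · rw [if_neg (fun h => heq (beq_iff_eq.mp h))]
        refine ih ts (j + 1) 1 (by omega) (by omega) (by omega) (by omega) (by omega) ?_ ?_ ?_
        · intro k hk1 hk2
          have : k = j := by omega
          subst this
          simp
        · right
          simp only [Nat.add_sub_cancel]
          intro hc
          exact heq hc.symm
        · intro i hi
          by_cases hij : i + 5 < j
          · exact hfail i hij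
          · have hij' : i + 5 = j := by omega
            have hj5 : 5 ≤ j := by omega
            rw [← Bool.not_eq_true, condA_iff ts i (by omega)]
            intro hall
            have e1 := hall (j - 1) (by omega) (by omega)
            have e2 := hall j (by omega) (by omega)
            exact heq (e2.trans e1.symm)
    · rw [bFindRun]
      simp only [hjlen, if_false]
      have hnone : (List.range (ts.length - 5)).find? (condA ts) = none := by
        rw [List.find?_eq_none]
        intro i hi
        have := List.mem_range.mp hi
        simp [hfail i (by omega)]
      rw [hnone]; rfl
theorem bFindRun_top (ts : List String) :
    bFindRun ts 1 1 = ((List.range (ts.length - 5)).find? (condA ts)).map (· + 1) := by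
  rcases Nat.eq_zero_or_pos ts.length with h0 | hpos
  · rw [bFindRun]
    simp [h0]
  · apply bFindRun_eq ts.length ts 1 1 (by omega) le_rfl (by omega) le_rfl hpos
    · intro k hk1 hk2
      have : k = 0 := by omega
      subst this; rfl
    · exact Or.inl rfl
    · intro i hi
      omega

-- ===== VERDICT (by name: the statement is the Claim_ definition above) =====
theorem sanitize_ai_output_spec : Claim_equal_sanitize_ai_output := by
  intro raw_text _
  unfold Spec_sanitize_ai_output sanitize_ai_output sanitize_ai_output_alt
  by_cases h : raw_text = ""
  · simp [h]
  · simp only [h, if_false]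
    rw [bFindRun_top]
    rcases hf : (List.range _).find? _ with _ | i <;> simp
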